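-- pv_equiv track=rewrite | github.com/lizzzcai/leetcode | python/sorting_and_searching/0363_Max_Sum_of_Rectangle_No_Larger_Than_K.py | maxSumSubmatrix
-- ===== SOURCE A (Python) =====
-- from typing import List
-- import math
-- import bisect
--
-- def maxSumSubmatrix(matrix: List[List[int]], k: int) -> int:
--     P = []
--     for row in matrix:
--         p = [0]
--         for x in row:
--             p.append(p[-1]+x)
--         P.append(p)
--
--     res = -math.inf
--     for c1 in range(len(P[0])):
--         for c2 in range(c1+1, len(P[0])):
--             # 2-D prefix sum between c1 and c2
--             curr_sum, curr_P = 0, [0]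
--             for r in range(len(P)):
--                 curr_sum += P[r][c2]-P[r][c1]
--                 idx = bisect.bisect_left(curr_P, curr_sum - k)
--                 if idx < len(curr_P):
--                     res = max(res, curr_sum - curr_P[idx])
--                     if res == k:
--                         return res
--                 bisect.insort_left(curr_P, curr_sum)
--
--     return res
-- ===== SOURCE B (Python) =====
-- from typing import List
--
--
-- def maxSumSubmatrix(matrix: List[List[int]], k: int) -> int:
--     # Plain exhaustive scan: for each pair of columns keep running row sums,
--     # then try every row range directly; no sorted structure, no bisect.
--     m = len(matrix)
--     n = len(matrix[0])
--     best = None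
--     for c1 in range(n):
--         sums = [0] * m
--         for c2 in range(c1, n):
--             for r in range(m):
--                 sums[r] += matrix[r][c2]
--             for r1 in range(m):
--                 s = 0
--                 for r2 in range(r1, m):
--                     s += sums[r2]
--                     if s <= k and (best is None or s > best):
--                         best = s
--     return best
-- ===== Notes on version B (the rewrite author's own statement) =====
-- stated objective: simpler
-- what changed: Replaces the sorted-prefix-array + bisect binary-search machinery (and its early return) with a plain exhaustive scan: for each column pair keep incremental row sums and try every row range directly.
-- outside the precondition, e.g. on maxSumSubmatrix([[5]], 1): A returns -inf, B returns None
import Mathlib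
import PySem

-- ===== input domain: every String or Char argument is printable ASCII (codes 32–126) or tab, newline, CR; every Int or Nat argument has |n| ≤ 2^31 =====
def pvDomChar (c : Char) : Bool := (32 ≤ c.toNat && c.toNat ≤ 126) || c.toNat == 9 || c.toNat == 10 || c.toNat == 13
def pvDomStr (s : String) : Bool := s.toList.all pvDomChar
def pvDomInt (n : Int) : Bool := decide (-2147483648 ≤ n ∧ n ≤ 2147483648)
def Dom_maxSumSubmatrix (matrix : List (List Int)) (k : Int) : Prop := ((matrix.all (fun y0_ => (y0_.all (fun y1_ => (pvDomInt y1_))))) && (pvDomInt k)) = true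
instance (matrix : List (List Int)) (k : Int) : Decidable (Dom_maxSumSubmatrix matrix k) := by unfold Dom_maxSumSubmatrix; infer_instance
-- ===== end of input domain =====

-- B replaces A's sorted-prefix-array + bisect machinery by a plain exhaustive scan over all
-- row ranges (objective: simpler, same asymptotic cost).  Equality of the RETURN value is
-- claimed on Pre_ (below); A's early `return res` is modelled by a done flag in the port.

-- ===== PORT A =====
-- p = [0]; for x in row: p.append(p[-1] + x)
def pvPrefixRow (row : List Int) : List Int :=
  row.foldl (fun p x => p ++ [p.getLastD 0 + x]) [0]

-- body of A's row loop (state: curr_sum × curr_P × res × done).  Python's `return res`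
-- becomes the done flag: once set, the remaining iterations leave the state unchanged.
-- res = -math.inf is `none` (max(-inf, c) = c); indexing uses getD because under Pre_
-- every index read here is in range (out-of-range would be Python's IndexError).
def pvRowStep (P : List (List Int)) (k : Int) (c1 c2 : Nat)
    (s : Int × List Int × Option Int × Bool) (r : Nat) : Int × List Int × Option Int × Bool :=
  if s.2.2.2 then s else
  let currSum : Int := s.1 + ((P.getD r []).getD c2 0 - (P.getD r []).getD c1 0)
  let idx : Nat := PySem.List.bisectLeft s.2.1 (currSum - k)
  let rd : Option Int × Bool :=
    if idx < s.2.1.length then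
      let res : Option Int := some (match s.2.2.1 with
        | none => currSum - s.2.1.getD idx 0
        | some v => max v (currSum - s.2.1.getD idx 0))
      (res, decide (res = some k))
    else (s.2.2.1, s.2.2.2)
  -- bisect.insort_left(curr_P, curr_sum)  (when done was just set, Python returns before
  -- this insert; the frozen state makes the extra insert invisible)
  (currSum, PySem.List.insert s.2.1 ((PySem.List.bisectLeft s.2.1 currSum : Nat) : Int) currSum, rd.1, rd.2)

-- one (c1, c2) column pair: curr_sum, curr_P = 0, [0]; for r in range(len(P)): …
def pvPairStep (P : List (List Int)) (k : Int) (st : Option Int × Bool) (c1 c2 : Nat) :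
    Option Int × Bool :=
  let inner := (List.range P.length).foldl (pvRowStep P k c1 c2) (0, [0], st.1, st.2)
  (inner.2.2.1, inner.2.2.2)

def maxSumSubmatrix (matrix : List (List Int)) (k : Int) : Int :=
  let P := matrix.map pvPrefixRow
  let n := (P.headD []).length     -- len(P[0]); the empty matrix (IndexError) is outside Pre_
  let st := (List.range n).foldl (fun st c1 =>
    (List.range' (c1+1) (n - (c1+1))).foldl (fun st c2 => pvPairStep P k st c1 c2) st)
    ((none : Option Int), false)
  -- res stays -math.inf (a float, not an int) when no rectangle sum ≤ k exists: outside Pre_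
  st.1.getD 0

-- ===== PORT B =====
-- innermost loop of Source B: s = 0; for r2 in range(r1, m): s += sums[r2]; maybe update best
def pvInnerB (k : Int) (sums : List Int) (m r1 : Nat) (best : Option Int) : Option Int :=
  ((List.range' r1 (m - r1)).foldl (fun (p : Int × Option Int) r2 =>
      let s := p.1 + sums.getD r2 0
      let b : Option Int := match p.2 with
        | none => if s ≤ k then some s else none
        | some v => if s ≤ k ∧ v < s then some s else some v
      (s, b)) ((0 : Int), best)).2

-- one c2 step: extend the running row sums by column c2, then scan all row ranges
def pvColStep (matrix : List (List Int)) (k : Int) (m : Nat)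
    (st : List Int × Option Int) (c2 : Nat) : List Int × Option Int :=
  let sums := (List.range m).map (fun r => st.1.getD r 0 + (matrix.getD r []).getD c2 0)
  (sums, (List.range m).foldl (fun best r1 => pvInnerB k sums m r1 best) st.2)

def maxSumSubmatrix_alt (matrix : List (List Int)) (k : Int) : Int :=
  let m := matrix.length
  let n := (matrix.headD []).length
  let best := (List.range n).foldl (fun best c1 =>
    ((List.range' c1 (n - c1)).foldl (pvColStep matrix k m) (List.replicate m 0, best)).2)
    (none : Option Int)
  -- Source B returns None when no rectangle sum ≤ k exists: outside Pre_
  best.getD 0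

-- ===== PRECONDITION & SPEC =====
-- spec-level cell and rectangle sum (independent of both ports), used by Pre_
def cellM (matrix : List (List Int)) (r c : Nat) : Int := (matrix.getD r []).getD c 0
def rectSumM (matrix : List (List Int)) (c1 c2 r1 r2 : Nat) : Int :=
  ∑ r ∈ Finset.Ico r1 (r2+1), ∑ c ∈ Finset.Ico c1 (c2+1), cellM matrix r c

-- Pre_ excludes exactly: the empty matrix (A raises IndexError on P[0]); matrices with a row
-- shorter than row 0 (A raises IndexError reading P[r][c2]); and inputs with no sub-rectangle
-- sum ≤ k, where A returns -math.inf (a float, not an int) and B returns None.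
def Pre_maxSumSubmatrix (matrix : List (List Int)) (k : Int) : Prop :=
  matrix ≠ [] ∧
  (∀ row ∈ matrix, (matrix.headD []).length ≤ row.length) ∧
  ((List.range (matrix.headD []).length).any (fun c1 =>
    (List.range' c1 ((matrix.headD []).length - c1)).any (fun c2 =>
      (List.range matrix.length).any (fun r1 =>
        (List.range' r1 (matrix.length - r1)).any (fun r2 =>
          decide (rectSumM matrix c1 c2 r1 r2 ≤ k)))))) = true

instance (matrix : List (List Int)) (k : Int) : Decidable (Pre_maxSumSubmatrix matrix k) := by
  unfold Pre_maxSumSubmatrix; infer_instance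

def pvWitness_maxSumSubmatrix : List (List Int) × Int := ([[1]], 5)

def Spec_maxSumSubmatrix (matrix : List (List Int)) (k : Int) (out : Int) : Prop := out = maxSumSubmatrix_alt matrix k
instance (matrix : List (List Int)) (k : Int) (out : Int) : Decidable (Spec_maxSumSubmatrix matrix k out) := by unfold Spec_maxSumSubmatrix; infer_instance

-- ===== CLAIM (what is proved, stated in full; the proofs are below) =====
def Claim_equal_maxSumSubmatrix : Prop := ∀ (matrix : List (List Int)) (k : Int), Dom_maxSumSubmatrix matrix k → Pre_maxSumSubmatrix matrix k → Spec_maxSumSubmatrix matrix k (maxSumSubmatrix matrix k)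

-- ===== LEMMAS AND PROOFS =====

-- spec-level row prefix sums and 2-D prefix sums
def rowPreM (matrix : List (List Int)) (r c : Nat) : Int := ∑ i ∈ Finset.range c, cellM matrix r i
def QabM (matrix : List (List Int)) (a b t : Nat) : Int :=
  ∑ r ∈ Finset.range t, (rowPreM matrix r b - rowPreM matrix r a)

-- "s is the sum of some admissible sub-rectangle and s ≤ k"
def goodM (matrix : List (List Int)) (k s : Int) : Prop :=
  ∃ c1 c2 r1 r2 : Nat, c1 ≤ c2 ∧ c2 < (matrix.headD []).length ∧ r1 ≤ r2 ∧
    r2 < matrix.length ∧ s = rectSumM matrix c1 c2 r1 r2 ∧ s ≤ k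

def geO (o : Option Int) (s : Int) : Prop := ∃ v, o = some v ∧ s ≤ v
def soundO (matrix : List (List Int)) (k : Int) (o : Option Int) : Prop :=
  ∀ v, o = some v → goodM matrix k v
def monoO (o o' : Option Int) : Prop := ∀ v, o = some v → geO o' v
def compPairO (matrix : List (List Int)) (k : Int) (c1 c2 : Nat) (o : Option Int) : Prop :=
  ∀ r1 r2 : Nat, r1 ≤ r2 → r2 < matrix.length → rectSumM matrix c1 c2 r1 r2 ≤ k →
    geO o (rectSumM matrix c1 c2 r1 r2)

lemma geO_mono {o o' : Option Int} {s : Int} (h : geO o s) (hm : monoO o o') : geO o' s := by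
  obtain ⟨v, hv, hs⟩ := h
  obtain ⟨v', hv', hvv⟩ := hm v hv
  exact ⟨v', hv', le_trans hs hvv⟩

lemma monoO_refl (o : Option Int) : monoO o o := fun v hv => ⟨v, hv, le_refl v⟩

lemma monoO_trans {o1 o2 o3 : Option Int} (h12 : monoO o1 o2) (h23 : monoO o2 o3) : monoO o1 o3 := by
  intro v hv
  obtain ⟨v2, hv2, h2⟩ := h12 v hv
  obtain ⟨v3, hv3, h3⟩ := h23 v2 hv2
  exact ⟨v3, hv3, le_trans h2 h3⟩

lemma compPairO_mono {matrix k c1 c2 o o'} (h : compPairO matrix k c1 c2 o) (hm : monoO o o') :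
    compPairO matrix k c1 c2 o' := fun r1 r2 h1 h2 h3 => geO_mono (h r1 r2 h1 h2 h3) hm

-- rectangle sums as 2-D prefix-sum differences
lemma rect_eq_Q (matrix : List (List Int)) (c1 c2 r1 r2 : Nat) (hc : c1 ≤ c2 + 1) (hr : r1 ≤ r2 + 1) :
    rectSumM matrix c1 c2 r1 r2 = QabM matrix c1 (c2+1) (r2+1) - QabM matrix c1 (c2+1) r1 := by
  unfold rectSumM QabM rowPreM
  rw [Finset.sum_congr rfl (fun r _ => Finset.sum_Ico_eq_sub (fun c => cellM matrix r c) hc)]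
  exact Finset.sum_Ico_eq_sub _ hr

-- ---- A-side: the prefix rows ----
def pvTail (s : Int) : List Int → List Int
  | [] => []
  | x :: xs => (s + x) :: pvTail (s + x) xs

lemma pvTail_length (row : List Int) : ∀ s : Int, (pvTail s row).length = row.length := by
  induction row with
  | nil => intro s; rfl
  | cons x xs ih => intro s; simp [pvTail, ih]

lemma foldl_prefix_eq (row : List Int) : ∀ (p : List Int), p ≠ [] →
    row.foldl (fun p x => p ++ [p.getLastD 0 + x]) p = p ++ pvTail (p.getLastD 0) row := by
  induction row with
  | nil => intro p _; simp [pvTail]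
  | cons x xs ih =>
    intro p hp
    have h1 : (p ++ [p.getLastD 0 + x]).getLastD 0 = p.getLastD 0 + x := by
      simp
    calc (x :: xs).foldl (fun p x => p ++ [p.getLastD 0 + x]) p
        = xs.foldl (fun p x => p ++ [p.getLastD 0 + x]) (p ++ [p.getLastD 0 + x]) := rfl
      _ = (p ++ [p.getLastD 0 + x]) ++ pvTail ((p ++ [p.getLastD 0 + x]).getLastD 0) xs := by
            exact ih _ (by simp)
      _ = p ++ pvTail (p.getLastD 0) (x :: xs) := by
            rw [h1, List.append_assoc]; rfl

lemma pvTail_getD (row : List Int) : ∀ (s : Int) (c : Nat), c ≤ row.length →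
    (s :: pvTail s row).getD c 0 = s + ∑ i ∈ Finset.range c, row.getD i 0 := by
  induction row with
  | nil =>
    intro s c hc
    have : c = 0 := Nat.le_zero.mp hc
    subst this
    simp [pvTail]
  | cons x xs ih =>
    intro s c hc
    cases c with
    | zero => simp
    | succ c =>
      have h1 : (s :: pvTail s (x :: xs)).getD (c+1) 0
          = ((s + x) :: pvTail (s + x) xs).getD c 0 := rfl
      rw [h1, ih (s + x) c (by simpa using hc), Finset.sum_range_succ']
      simp
      ring

lemma prefixRow_getD (row : List Int) (c : Nat) (h : c ≤ row.length) :
    (pvPrefixRow row).getD c 0 = ∑ i ∈ Finset.range c, row.getD i 0 := by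
  have h0 : pvPrefixRow row = (0 : Int) :: pvTail 0 row := by
    unfold pvPrefixRow
    rw [foldl_prefix_eq row [0] (by simp)]
    rfl
  rw [h0, pvTail_getD row 0 c h]
  ring

lemma prefixRow_length (row : List Int) : (pvPrefixRow row).length = row.length + 1 := by
  have h0 : pvPrefixRow row = (0 : Int) :: pvTail 0 row := by
    unfold pvPrefixRow
    rw [foldl_prefix_eq row [0] (by simp)]
    rfl
  rw [h0]
  simp [pvTail_length]

lemma Pget (matrix : List (List Int)) (r c : Nat) (hr : r < matrix.length)
    (hc : c ≤ (matrix.getD r []).length) :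
    ((matrix.map pvPrefixRow).getD r []).getD c 0 = rowPreM matrix r c := by
  have h1 : (matrix.map pvPrefixRow).getD r [] = pvPrefixRow (matrix.getD r []) := by
    rw [List.getD_eq_getElem _ _ (by simpa using hr), List.getD_eq_getElem _ _ hr,
      List.getElem_map]
  rw [h1, prefixRow_getD _ _ hc]
  rfl

lemma headD_map_prefix (matrix : List (List Int)) (h : matrix ≠ []) :
    ((matrix.map pvPrefixRow).headD []).length = (matrix.headD []).length + 1 := by
  cases matrix with
  | nil => exact absurd rfl h
  | cons row t => simpa using prefixRow_length row

-- ---- A-side: bisect facts on a sorted list ----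
lemma bisect_min (l : List Int) (x : Int) (hs : l.Pairwise (· ≤ ·)) {e : Int}
    (he : e ∈ l) (hxe : x ≤ e) :
    PySem.List.bisectLeft l x < l.length ∧ l.getD (PySem.List.bisectLeft l x) 0 ≤ e := by
  obtain ⟨hlen, hlt, hge⟩ := PySem.List.bisectLeft_spec l x hs
  obtain ⟨j, hj, hje⟩ := List.mem_iff_getElem.mp he
  have hij : PySem.List.bisectLeft l x ≤ j := by
    by_contra hc
    exact absurd (hje ▸ hxe) (not_le.mpr (hlt j hj (not_le.mp hc)))
  have hlt' : PySem.List.bisectLeft l x < l.length := lt_of_le_of_lt hij hj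
  refine ⟨hlt', ?_⟩
  rw [List.getD_eq_getElem _ _ hlt']
  rcases Nat.lt_or_ge (PySem.List.bisectLeft l x) j with h | h
  · have := List.pairwise_iff_getElem.mp hs _ _ hlt' hj h
    omega
  · have : PySem.List.bisectLeft l x = j := le_antisymm hij h
    subst this
    exact le_of_eq hje

lemma bisect_getD_ge (l : List Int) (x : Int) (hs : l.Pairwise (· ≤ ·))
    (h : PySem.List.bisectLeft l x < l.length) :
    x ≤ l.getD (PySem.List.bisectLeft l x) 0 ∧ l.getD (PySem.List.bisectLeft l x) 0 ∈ l := by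
  obtain ⟨hlen, hlt, hge⟩ := PySem.List.bisectLeft_spec l x hs
  rw [List.getD_eq_getElem _ _ h]
  exact ⟨hge _ h (le_refl _), List.getElem_mem h⟩

lemma insort_sorted (l : List Int) (x : Int) (hs : l.Pairwise (· ≤ ·)) :
    (PySem.List.insert l ((PySem.List.bisectLeft l x : Nat) : Int) x).Pairwise (· ≤ ·) := by
  obtain ⟨hlen, hlt, hge⟩ := PySem.List.bisectLeft_spec l x hs
  rw [PySem.List.insert_natCast l _ x hlen, List.pairwise_append]
  have htake : ∀ a ∈ List.take (PySem.List.bisectLeft l x) l, a < x := by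
    intro a ha
    obtain ⟨i, hi, hia⟩ := List.mem_iff_getElem.mp ha
    have hi2 : i < PySem.List.bisectLeft l x := lt_of_lt_of_le hi (by simp [List.length_take])
    have hil : i < l.length := lt_of_lt_of_le hi (by simp)
    rw [← hia, List.getElem_take]
    exact hlt i hil hi2
  have hdrop : ∀ b ∈ List.drop (PySem.List.bisectLeft l x) l, x ≤ b := by
    intro b hb
    obtain ⟨j, hj, hjb⟩ := List.mem_iff_getElem.mp hb
    have hj2 : PySem.List.bisectLeft l x + j < l.length := by
      have := List.length_drop (l := l) (i := PySem.List.bisectLeft l x)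
      omega
    rw [← hjb, List.getElem_drop]
    exact hge _ hj2 (Nat.le_add_right _ _)
  refine ⟨hs.sublist (List.take_sublist _ _), ?_, ?_⟩
  · rw [List.pairwise_cons]
    exact ⟨hdrop, hs.sublist (List.drop_sublist _ _)⟩
  · intro a ha b hb
    rcases List.mem_cons.mp hb with rfl | hb
    · exact le_of_lt (htake a ha)
    · exact le_trans (le_of_lt (htake a ha)) (hdrop b hb)

lemma insort_mem (l : List Int) (x e : Int) (hs : l.Pairwise (· ≤ ·)) :
    e ∈ PySem.List.insert l ((PySem.List.bisectLeft l x : Nat) : Int) x ↔ e = x ∨ e ∈ l := by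
  obtain ⟨hlen, _, _⟩ := PySem.List.bisectLeft_spec l x hs
  rw [PySem.List.insert_natCast l _ x hlen]
  constructor
  · intro h
    rcases List.mem_append.mp h with h | h
    · exact Or.inr (List.mem_of_mem_take h)
    · rcases List.mem_cons.mp h with rfl | h
      · exact Or.inl rfl
      · exact Or.inr (List.mem_of_mem_drop h)
  · intro h
    rcases h with rfl | h
    · exact List.mem_append.mpr (Or.inr (List.mem_cons_self))
    · conv at h => rw [← List.take_append_drop (PySem.List.bisectLeft l x) l]
      rcases List.mem_append.mp h with h | h
      · exact List.mem_append.mpr (Or.inl h)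
      · exact List.mem_append.mpr (Or.inr (List.mem_cons_of_mem _ h))

-- ---- A-side: the row-loop invariant ----
def RInvA (matrix : List (List Int)) (k : Int) (res0 : Option Int) (a b t : Nat)
    (s : Int × List Int × Option Int × Bool) : Prop :=
  (s.2.2.2 = decide (s.2.2.1 = some k)) ∧
  soundO matrix k s.2.2.1 ∧ monoO res0 s.2.2.1 ∧
  (s.2.2.2 = false →
    s.1 = QabM matrix a b t ∧
    s.2.1.Pairwise (· ≤ ·) ∧
    (∀ e : Int, e ∈ s.2.1 ↔ ∃ j : Nat, j ≤ t ∧ e = QabM matrix a b j) ∧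
    (∀ r1 r2 : Nat, r1 ≤ r2 → r2 < t → rectSumM matrix a (b-1) r1 r2 ≤ k →
      geO s.2.2.1 (rectSumM matrix a (b-1) r1 r2)))

-- QabM/rowPreM recurrences
lemma Qab_succ (matrix : List (List Int)) (a b t : Nat) :
    QabM matrix a b (t+1) = QabM matrix a b t + (rowPreM matrix t b - rowPreM matrix t a) :=
  Finset.sum_range_succ _ t

lemma rowPre_succ (matrix : List (List Int)) (r c : Nat) :
    rowPreM matrix r (c+1) = rowPreM matrix r c + cellM matrix r c :=
  Finset.sum_range_succ _ c

lemma rect_top (matrix : List (List Int)) (a b r1 t : Nat) (hab : a < b) (hr : r1 ≤ t) :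
    rectSumM matrix a (b-1) r1 t = QabM matrix a b (t+1) - QabM matrix a b r1 := by
  have hb1 : b - 1 + 1 = b := by omega
  have := rect_eq_Q matrix a (b-1) r1 t (by omega) (by omega)
  rwa [hb1] at this

lemma rowStep_inv (matrix : List (List Int)) (k : Int)
    (hw : ∀ row ∈ matrix, (matrix.headD []).length ≤ row.length)
    (a b : Nat) (hab : a < b) (hb : b ≤ (matrix.headD []).length)
    (res0 : Option Int) (t : Nat) (ht : t < matrix.length)
    (s : Int × List Int × Option Int × Bool)
    (h : RInvA matrix k res0 a b t s) :
    RInvA matrix k res0 a b (t+1) (pvRowStep (matrix.map pvPrefixRow) k a b s t) := by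
  obtain ⟨hdone, hsound, hmono, hrest⟩ := h
  rcases s with ⟨cs, cp, res, done⟩
  simp only at hdone hsound hmono hrest
  cases done with
  | true =>
    have hfix : pvRowStep (matrix.map pvPrefixRow) k a b (cs, cp, res, true) t
        = (cs, cp, res, true) := by simp [pvRowStep]
    rw [hfix]
    exact ⟨hdone, hsound, hmono, by intro hf; simp at hf⟩
  | false =>
    obtain ⟨hcs, hsorted, hmem, hcomp⟩ := hrest rfl
    have hrowmem : matrix.getD t [] ∈ matrix := by
      rw [List.getD_eq_getElem _ _ ht]; exact List.getElem_mem ht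
    have hrow : (matrix.headD []).length ≤ (matrix.getD t []).length := hw _ hrowmem
    have hPb : ((matrix.map pvPrefixRow).getD t []).getD b 0 = rowPreM matrix t b :=
      Pget matrix t b ht (le_trans hb hrow)
    have hPa : ((matrix.map pvPrefixRow).getD t []).getD a 0 = rowPreM matrix t a :=
      Pget matrix t a ht (le_trans (by omega) hrow)
    set currSum : Int := cs + (((matrix.map pvPrefixRow).getD t []).getD b 0
      - ((matrix.map pvPrefixRow).getD t []).getD a 0) with hcurr
    have hQ : currSum = QabM matrix a b (t+1) := by
      rw [hcurr, hPa, hPb, hcs, Qab_succ]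
    -- the updated prefix list
    have hmem' : ∀ e : Int, e ∈ PySem.List.insert cp
        ((PySem.List.bisectLeft cp currSum : Nat) : Int) currSum
        ↔ ∃ j : Nat, j ≤ t + 1 ∧ e = QabM matrix a b j := by
      intro e
      rw [insort_mem cp currSum e hsorted]
      constructor
      · rintro (rfl | he)
        · exact ⟨t+1, le_refl _, hQ⟩
        · obtain ⟨j, hj, rfl⟩ := (hmem e).mp he
          exact ⟨j, by omega, rfl⟩
      · rintro ⟨j, hj, rfl⟩
        by_cases hjt : j = t + 1
        · subst hjt; exact Or.inl hQ.symm
        · exact Or.inr ((hmem _).mpr ⟨j, by omega, rfl⟩)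
    have hsorted' := insort_sorted cp currSum hsorted
    by_cases hidx : PySem.List.bisectLeft cp (currSum - k) < cp.length
    · -- a candidate is taken
      set g : Int := cp.getD (PySem.List.bisectLeft cp (currSum - k)) 0 with hg
      obtain ⟨hxg, hgmem⟩ := bisect_getD_ge cp (currSum - k) hsorted hidx
      obtain ⟨j0, hj0, hj0g⟩ := (hmem g).mp hgmem
      have hcandk : currSum - g ≤ k := by omega
      have hcand_good : goodM matrix k (currSum - g) := by
        refine ⟨a, b-1, j0, t, by omega, by omega, hj0, ht, ?_, hcandk⟩
        rw [rect_top matrix a b j0 t hab hj0, ← hQ, hj0g]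
      have key : ∀ w : Int, goodM matrix k w → (∀ v, res = some v → v ≤ w) →
          currSum - g ≤ w →
          RInvA matrix k res0 a b (t+1)
            (currSum,
             PySem.List.insert cp ((PySem.List.bisectLeft cp currSum : Nat) : Int) currSum,
             some w, decide ((some w : Option Int) = some k)) := by
        intro w hwgood hresw hcandw
        refine ⟨rfl, ?_, ?_, ?_⟩
        · intro v hv
          injection hv with hv'
          subst hv'; exact hwgood
        · intro v0 hv0
          obtain ⟨v1, hv1, h01⟩ := hmono v0 hv0
          exact ⟨w, rfl, le_trans h01 (hresw v1 hv1)⟩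
        · intro _
          refine ⟨hQ, hsorted', hmem', ?_⟩
          intro r1 r2 hr12 hr2 hSk
          rcases Nat.lt_or_ge r2 t with hlt | hge
          · obtain ⟨v1, hv1, hSv⟩ := hcomp r1 r2 hr12 hlt hSk
            exact ⟨w, rfl, le_trans hSv (hresw v1 hv1)⟩
          · have hr2t : r2 = t := by omega
            subst hr2t
            have hSQ : rectSumM matrix a (b-1) r1 r2 = currSum - QabM matrix a b r1 := by
              rw [rect_top matrix a b r1 r2 hab hr12, ← hQ]
            have hQr1mem : QabM matrix a b r1 ∈ cp := (hmem _).mpr ⟨r1, hr12, rfl⟩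
            have hxQ : currSum - k ≤ QabM matrix a b r1 := by
              rw [hSQ] at hSk; omega
            obtain ⟨_, hgle⟩ := bisect_min cp (currSum - k) hsorted hQr1mem hxQ
            rw [← hg] at hgle
            exact ⟨w, rfl, by rw [hSQ]; omega⟩
      cases res with
      | none =>
        have hstep : pvRowStep (matrix.map pvPrefixRow) k a b (cs, cp, (none : Option Int), false) t
            = (currSum,
               PySem.List.insert cp ((PySem.List.bisectLeft cp currSum : Nat) : Int) currSum,
               some (currSum - g), decide ((some (currSum - g) : Option Int) = some k)) := by
          simp only [pvRowStep]
          rw [← hcurr, ← hg]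
          simp [hidx]
        rw [hstep]
        exact key (currSum - g) hcand_good (by intro v hv; cases hv) (le_refl _)
      | some v =>
        have hstep : pvRowStep (matrix.map pvPrefixRow) k a b (cs, cp, some v, false) t
            = (currSum,
               PySem.List.insert cp ((PySem.List.bisectLeft cp currSum : Nat) : Int) currSum,
               some (max v (currSum - g)), decide ((some (max v (currSum - g)) : Option Int) = some k)) := by
          simp only [pvRowStep]
          rw [← hcurr, ← hg]
          simp [hidx]
        rw [hstep]
        refine key (max v (currSum - g)) ?_ ?_ (le_max_right _ _)
        · rcases max_choice v (currSum - g) with hmx | hmx <;> rw [hmx]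
          · exact hsound v rfl
          · exact hcand_good
        · intro v1 hv1
          injection hv1 with hv1'
          subst hv1'; exact le_max_left _ _
    · -- no candidate: the bisect index is past the end
      have hstep : pvRowStep (matrix.map pvPrefixRow) k a b (cs, cp, res, false) t
          = (currSum,
             PySem.List.insert cp ((PySem.List.bisectLeft cp currSum : Nat) : Int) currSum,
             res, false) := by
        simp only [pvRowStep]
        rw [← hcurr]
        simp [hidx]
      rw [hstep]
      refine ⟨hdone, hsound, hmono, ?_⟩
      intro _
      refine ⟨hQ, hsorted', hmem', ?_⟩
      intro r1 r2 hr12 hr2 hSk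
      rcases Nat.lt_or_ge r2 t with hlt | hge
      · exact hcomp r1 r2 hr12 hlt hSk
      · have hr2t : r2 = t := by omega
        subst hr2t
        have hSQ : rectSumM matrix a (b-1) r1 r2 = currSum - QabM matrix a b r1 := by
          rw [rect_top matrix a b r1 r2 hab hr12, ← hQ]
        have hQr1mem : QabM matrix a b r1 ∈ cp := (hmem _).mpr ⟨r1, hr12, rfl⟩
        have hxQ : currSum - k ≤ QabM matrix a b r1 := by rw [hSQ] at hSk; omega
        exact absurd (bisect_min cp (currSum - k) hsorted hQr1mem hxQ).1 hidx

lemma rowLoop_inv (matrix : List (List Int)) (k : Int)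
    (hw : ∀ row ∈ matrix, (matrix.headD []).length ≤ row.length)
    (a b : Nat) (hab : a < b) (hb : b ≤ (matrix.headD []).length)
    (res0 : Option Int) (done0 : Bool) (hd0 : done0 = decide (res0 = some k))
    (hs0 : soundO matrix k res0) :
    ∀ t : Nat, t ≤ matrix.length →
      RInvA matrix k res0 a b t
        ((List.range t).foldl (pvRowStep (matrix.map pvPrefixRow) k a b) (0, [0], res0, done0)) := by
  intro t
  induction t with
  | zero =>
    intro _
    simp only [List.range_zero, List.foldl_nil]
    refine ⟨hd0, hs0, monoO_refl res0, ?_⟩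
    intro _
    refine ⟨by simp [QabM], by simp, ?_, ?_⟩
    · intro e
      constructor
      · intro he
        refine ⟨0, le_refl 0, ?_⟩
        simp at he
        simp [QabM, he]
      · rintro ⟨j, hj, rfl⟩
        have : j = 0 := by omega
        subst this
        simp [QabM]
    · intro r1 r2 _ h2
      omega
  | succ t ih =>
    intro ht
    rw [List.range_succ, List.foldl_append, List.foldl_cons, List.foldl_nil]
    exact rowStep_inv matrix k hw a b hab hb res0 t (by omega) _ (ih (by omega))

lemma pairStep_props (matrix : List (List Int)) (k : Int)
    (hw : ∀ row ∈ matrix, (matrix.headD []).length ≤ row.length)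
    (a b : Nat) (hab : a < b) (hb : b ≤ (matrix.headD []).length)
    (st : Option Int × Bool) (hd : st.2 = decide (st.1 = some k)) (hs : soundO matrix k st.1) :
    (pvPairStep (matrix.map pvPrefixRow) k st a b).2
        = decide ((pvPairStep (matrix.map pvPrefixRow) k st a b).1 = some k) ∧
    soundO matrix k (pvPairStep (matrix.map pvPrefixRow) k st a b).1 ∧
    monoO st.1 (pvPairStep (matrix.map pvPrefixRow) k st a b).1 ∧
    compPairO matrix k a (b-1) (pvPairStep (matrix.map pvPrefixRow) k st a b).1 := by
  have hlen : (matrix.map pvPrefixRow).length = matrix.length := by simp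
  have hinv := rowLoop_inv matrix k hw a b hab hb st.1 st.2 hd hs matrix.length (le_refl _)
  obtain ⟨h1, h2, h3, h4⟩ := hinv
  have hps : pvPairStep (matrix.map pvPrefixRow) k st a b
      = (((List.range matrix.length).foldl (pvRowStep (matrix.map pvPrefixRow) k a b)
          (0, [0], st.1, st.2)).2.2.1,
         ((List.range matrix.length).foldl (pvRowStep (matrix.map pvPrefixRow) k a b)
          (0, [0], st.1, st.2)).2.2.2) := by
    simp only [pvPairStep, hlen]
  rw [hps]
  refine ⟨h1, h2, h3, ?_⟩
  intro r1 r2 hr12 hr2 hSk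
  cases hdn : ((List.range matrix.length).foldl (pvRowStep (matrix.map pvPrefixRow) k a b)
      (0, [0], st.1, st.2)).2.2.2 with
  | true =>
    have hk : ((List.range matrix.length).foldl (pvRowStep (matrix.map pvPrefixRow) k a b)
        (0, [0], st.1, st.2)).2.2.1 = some k := by
      rw [hdn] at h1
      exact of_decide_eq_true h1.symm
    exact ⟨k, hk, hSk⟩
  | false =>
    exact (h4 hdn).2.2.2 r1 r2 hr12 hr2 hSk

lemma c2fold (matrix : List (List Int)) (k : Int)
    (hw : ∀ row ∈ matrix, (matrix.headD []).length ≤ row.length)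
    (a : Nat) :
    ∀ u : Nat, a + 1 + u ≤ (matrix.headD []).length + 1 →
    ∀ st : Option Int × Bool, st.2 = decide (st.1 = some k) → soundO matrix k st.1 →
    ((List.range' (a+1) u).foldl (fun st c2 => pvPairStep (matrix.map pvPrefixRow) k st a c2) st).2
      = decide (((List.range' (a+1) u).foldl
          (fun st c2 => pvPairStep (matrix.map pvPrefixRow) k st a c2) st).1 = some k) ∧
    soundO matrix k ((List.range' (a+1) u).foldl
          (fun st c2 => pvPairStep (matrix.map pvPrefixRow) k st a c2) st).1 ∧
    monoO st.1 ((List.range' (a+1) u).foldl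
          (fun st c2 => pvPairStep (matrix.map pvPrefixRow) k st a c2) st).1 ∧
    (∀ b : Nat, a + 1 ≤ b → b < a + 1 + u →
      compPairO matrix k a (b-1) ((List.range' (a+1) u).foldl
          (fun st c2 => pvPairStep (matrix.map pvPrefixRow) k st a c2) st).1) := by
  intro u
  induction u with
  | zero =>
    intro _ st h1 h2
    simp only [List.range'_zero, List.foldl_nil]
    exact ⟨h1, h2, monoO_refl st.1, by intro b hb1 hb2; omega⟩
  | succ u ih =>
    intro hu st h1 h2
    rw [List.range'_1_concat, List.foldl_append, List.foldl_cons, List.foldl_nil]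
    obtain ⟨i1, i2, i3, i4⟩ := ih (by omega) st h1 h2
    obtain ⟨p1, p2, p3, p4⟩ := pairStep_props matrix k hw a (a+1+u) (by omega) (by omega) _ i1 i2
    refine ⟨p1, p2, monoO_trans i3 p3, ?_⟩
    intro b hb1 hb2
    rcases Nat.lt_or_ge b (a+1+u) with hlt | hge
    · exact compPairO_mono (i4 b hb1 hlt) p3
    · have : b = a+1+u := by omega
      subst this
      exact p4

lemma c1fold (matrix : List (List Int)) (k : Int)
    (hw : ∀ row ∈ matrix, (matrix.headD []).length ≤ row.length) :
    ∀ u : Nat, u ≤ (matrix.headD []).length + 1 →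
    ∀ st : Option Int × Bool, st.2 = decide (st.1 = some k) → soundO matrix k st.1 →
    ((List.range u).foldl (fun st c1 =>
        (List.range' (c1+1) ((matrix.headD []).length + 1 - (c1+1))).foldl
          (fun st c2 => pvPairStep (matrix.map pvPrefixRow) k st c1 c2) st) st).2
      = decide (((List.range u).foldl (fun st c1 =>
        (List.range' (c1+1) ((matrix.headD []).length + 1 - (c1+1))).foldl
          (fun st c2 => pvPairStep (matrix.map pvPrefixRow) k st c1 c2) st) st).1 = some k) ∧
    soundO matrix k ((List.range u).foldl (fun st c1 =>
        (List.range' (c1+1) ((matrix.headD []).length + 1 - (c1+1))).foldl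
          (fun st c2 => pvPairStep (matrix.map pvPrefixRow) k st c1 c2) st) st).1 ∧
    (∀ a b : Nat, a < u → a < b → b ≤ (matrix.headD []).length →
      compPairO matrix k a (b-1) ((List.range u).foldl (fun st c1 =>
        (List.range' (c1+1) ((matrix.headD []).length + 1 - (c1+1))).foldl
          (fun st c2 => pvPairStep (matrix.map pvPrefixRow) k st c1 c2) st) st).1) := by
  intro u
  induction u with
  | zero =>
    intro _ st h1 h2
    simp only [List.range_zero, List.foldl_nil]
    exact ⟨h1, h2, by intro a b ha _ _; omega⟩
  | succ u ih =>
    intro hu st h1 h2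
    rw [List.range_succ, List.foldl_append, List.foldl_cons, List.foldl_nil]
    obtain ⟨i1, i2, i3⟩ := ih (by omega) st h1 h2
    have hcnt : (matrix.headD []).length + 1 - (u+1) = (matrix.headD []).length - u := by omega
    obtain ⟨q1, q2, q3, q4⟩ := c2fold matrix k hw u ((matrix.headD []).length - u)
      (by omega) _ i1 i2
    rw [hcnt]
    refine ⟨q1, q2, ?_⟩
    intro a b ha hab hb
    rcases Nat.lt_or_ge a u with hlt | hge
    · exact compPairO_mono (i3 a b hlt hab hb) q3
    · have : a = u := by omega
      subst this
      exact q4 b (by omega) (by omega)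

-- A's whole double column loop
lemma aResult (matrix : List (List Int)) (k : Int)
    (hw : ∀ row ∈ matrix, (matrix.headD []).length ≤ row.length) :
    soundO matrix k
      ((List.range ((matrix.headD []).length + 1)).foldl (fun st c1 =>
        (List.range' (c1+1) ((matrix.headD []).length + 1 - (c1+1))).foldl
          (fun st c2 => pvPairStep (matrix.map pvPrefixRow) k st c1 c2) st)
        ((none : Option Int), false)).1 ∧
    (∀ c1 c2 : Nat, c1 ≤ c2 → c2 < (matrix.headD []).length →
      compPairO matrix k c1 c2
        ((List.range ((matrix.headD []).length + 1)).foldl (fun st c1 =>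
          (List.range' (c1+1) ((matrix.headD []).length + 1 - (c1+1))).foldl
            (fun st c2 => pvPairStep (matrix.map pvPrefixRow) k st c1 c2) st)
          ((none : Option Int), false)).1) := by
  obtain ⟨h1, h2, h3⟩ := c1fold matrix k hw ((matrix.headD []).length + 1) (le_refl _)
    ((none : Option Int), false) (by simp) (by intro v hv; cases hv)
  refine ⟨h2, ?_⟩
  intro c1 c2 hc12 hc2
  have := h3 c1 (c2+1) (by omega) (by omega) (by omega)
  simpa using this

-- ---- B-side ----
lemma innerBfold (matrix : List (List Int)) (k : Int) (c1 c2 : Nat)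
    (hc1 : c1 ≤ c2) (hc2 : c2 < (matrix.headD []).length)
    (sums : List Int)
    (hsums : ∀ r : Nat, r < matrix.length →
      sums.getD r 0 = rowPreM matrix r (c2+1) - rowPreM matrix r c1)
    (r1 : Nat) :
    ∀ u : Nat, r1 + u ≤ matrix.length →
    ∀ best : Option Int, soundO matrix k best →
    ((List.range' r1 u).foldl (fun (p : Int × Option Int) r2 =>
      let s := p.1 + sums.getD r2 0
      let b : Option Int := match p.2 with
        | none => if s ≤ k then some s else none
        | some v => if s ≤ k ∧ v < s then some s else some v
      (s, b)) ((0 : Int), best)).1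
        = QabM matrix c1 (c2+1) (r1+u) - QabM matrix c1 (c2+1) r1 ∧
    soundO matrix k ((List.range' r1 u).foldl (fun (p : Int × Option Int) r2 =>
      let s := p.1 + sums.getD r2 0
      let b : Option Int := match p.2 with
        | none => if s ≤ k then some s else none
        | some v => if s ≤ k ∧ v < s then some s else some v
      (s, b)) ((0 : Int), best)).2 ∧
    monoO best ((List.range' r1 u).foldl (fun (p : Int × Option Int) r2 =>
      let s := p.1 + sums.getD r2 0
      let b : Option Int := match p.2 with
        | none => if s ≤ k then some s else none
        | some v => if s ≤ k ∧ v < s then some s else some v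
      (s, b)) ((0 : Int), best)).2 ∧
    (∀ r2 : Nat, r1 ≤ r2 → r2 < r1 + u → rectSumM matrix c1 c2 r1 r2 ≤ k →
      geO ((List.range' r1 u).foldl (fun (p : Int × Option Int) r2 =>
        let s := p.1 + sums.getD r2 0
        let b : Option Int := match p.2 with
          | none => if s ≤ k then some s else none
          | some v => if s ≤ k ∧ v < s then some s else some v
        (s, b)) ((0 : Int), best)).2 (rectSumM matrix c1 c2 r1 r2)) := by
  intro u
  induction u with
  | zero =>
    intro _ best hbest
    simp only [List.range'_zero, List.foldl_nil]
    exact ⟨by simp, hbest, monoO_refl best, by intro r2 h1 h2; omega⟩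
  | succ u ih =>
    intro hu best hbest
    rw [List.range'_1_concat, List.foldl_append, List.foldl_cons, List.foldl_nil]
    obtain ⟨i1, i2, i3, i4⟩ := ih (by omega) best hbest
    set p := ((List.range' r1 u).foldl (fun (p : Int × Option Int) r2 =>
      let s := p.1 + sums.getD r2 0
      let b : Option Int := match p.2 with
        | none => if s ≤ k then some s else none
        | some v => if s ≤ k ∧ v < s then some s else some v
      (s, b)) ((0 : Int), best)) with hp
    have hr2m : r1 + u < matrix.length := by omega
    have hsnew : p.1 + sums.getD (r1+u) 0
        = QabM matrix c1 (c2+1) (r1+u+1) - QabM matrix c1 (c2+1) r1 := by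
      rw [i1, hsums (r1+u) hr2m, Qab_succ]
      ring
    have hrect : rectSumM matrix c1 c2 r1 (r1+u)
        = QabM matrix c1 (c2+1) (r1+u+1) - QabM matrix c1 (c2+1) r1 :=
      rect_eq_Q matrix c1 c2 r1 (r1+u) (by omega) (by omega)
    have hSval : rectSumM matrix c1 c2 r1 (r1+u) = p.1 + sums.getD (r1+u) 0 := by
      rw [hrect, hsnew]
    have hgood : p.1 + sums.getD (r1+u) 0 ≤ k → goodM matrix k (p.1 + sums.getD (r1+u) 0) := by
      intro hk
      exact ⟨c1, c2, r1, r1+u, hc1, hc2, by omega, hr2m, hSval.symm, hk⟩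
    cases hb2 : p.2 with
    | none =>
      by_cases hk : p.1 + sums.getD (r1+u) 0 ≤ k
      · simp only [if_pos hk]
        refine ⟨hsnew, ?_, ?_, ?_⟩
        · intro w hw
          injection hw with hw'
          subst hw'
          exact hgood hk
        · intro v0 hv0
          obtain ⟨v1, hv1, _⟩ := i3 v0 hv0
          rw [hb2] at hv1; cases hv1
        · intro r2 hr12 hr2u hSk
          rcases Nat.lt_or_ge r2 (r1+u) with hlt | hge
          · obtain ⟨v1, hv1, _⟩ := i4 r2 hr12 hlt hSk
            rw [hb2] at hv1; cases hv1
          · have : r2 = r1 + u := by omega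
            subst this
            exact ⟨p.1 + sums.getD (r1+u) 0, rfl, le_of_eq hSval⟩
      · simp only [if_neg hk]
        refine ⟨hsnew, ?_, ?_, ?_⟩
        · intro w hw; cases hw
        · intro v0 hv0
          obtain ⟨v1, hv1, _⟩ := i3 v0 hv0
          rw [hb2] at hv1; cases hv1
        · intro r2 hr12 hr2u hSk
          rcases Nat.lt_or_ge r2 (r1+u) with hlt | hge
          · obtain ⟨v1, hv1, _⟩ := i4 r2 hr12 hlt hSk
            rw [hb2] at hv1; cases hv1
          · have : r2 = r1 + u := by omega
            subst this
            rw [hSval] at hSk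
            exact absurd hSk hk
    | some v =>
      by_cases hk : p.1 + sums.getD (r1+u) 0 ≤ k ∧ v < p.1 + sums.getD (r1+u) 0
      · simp only [if_pos hk]
        refine ⟨hsnew, ?_, ?_, ?_⟩
        · intro w hw
          injection hw with hw'
          subst hw'
          exact hgood hk.1
        · intro v0 hv0
          obtain ⟨v1, hv1, h01⟩ := i3 v0 hv0
          rw [hb2] at hv1
          injection hv1 with hv1'
          subst hv1'
          exact ⟨p.1 + sums.getD (r1+u) 0, rfl, by omega⟩
        · intro r2 hr12 hr2u hSk
          rcases Nat.lt_or_ge r2 (r1+u) with hlt | hge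
          · obtain ⟨v1, hv1, hSv⟩ := i4 r2 hr12 hlt hSk
            rw [hb2] at hv1
            injection hv1 with hv1'
            subst hv1'
            exact ⟨p.1 + sums.getD (r1+u) 0, rfl, by omega⟩
          · have : r2 = r1 + u := by omega
            subst this
            exact ⟨p.1 + sums.getD (r1+u) 0, rfl, le_of_eq hSval⟩
      · simp only [if_neg hk]
        refine ⟨hsnew, ?_, ?_, ?_⟩
        · intro w hw
          injection hw with hw'
          subst hw'
          exact i2 _ hb2
        · intro v0 hv0
          obtain ⟨v1, hv1, h01⟩ := i3 v0 hv0
          rw [hb2] at hv1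
          injection hv1 with hv1'
          subst hv1'
          exact ⟨v, rfl, h01⟩
        · intro r2 hr12 hr2u hSk
          rcases Nat.lt_or_ge r2 (r1+u) with hlt | hge
          · obtain ⟨v1, hv1, hSv⟩ := i4 r2 hr12 hlt hSk
            rw [hb2] at hv1
            injection hv1 with hv1'
            subst hv1'
            exact ⟨v, rfl, hSv⟩
          · have : r2 = r1 + u := by omega
            subst this
            have hvk : p.1 + sums.getD (r1+u) 0 ≤ v := by
              rw [hSval] at hSk
              rcases not_and_or.mp hk with h | h
              · exact absurd hSk h
              · omega
            exact ⟨v, rfl, by rw [hSval]; exact hvk⟩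

lemma r1fold (matrix : List (List Int)) (k : Int) (c1 c2 : Nat)
    (hc1 : c1 ≤ c2) (hc2 : c2 < (matrix.headD []).length)
    (sums : List Int)
    (hsums : ∀ r : Nat, r < matrix.length →
      sums.getD r 0 = rowPreM matrix r (c2+1) - rowPreM matrix r c1) :
    ∀ u : Nat, u ≤ matrix.length →
    ∀ best : Option Int, soundO matrix k best →
    soundO matrix k ((List.range u).foldl
        (fun best r1 => pvInnerB k sums matrix.length r1 best) best) ∧
    monoO best ((List.range u).foldl
        (fun best r1 => pvInnerB k sums matrix.length r1 best) best) ∧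
    (∀ r1 r2 : Nat, r1 < u → r1 ≤ r2 → r2 < matrix.length →
      rectSumM matrix c1 c2 r1 r2 ≤ k →
      geO ((List.range u).foldl (fun best r1 => pvInnerB k sums matrix.length r1 best) best)
        (rectSumM matrix c1 c2 r1 r2)) := by
  intro u
  induction u with
  | zero =>
    intro _ best hbest
    simp only [List.range_zero, List.foldl_nil]
    exact ⟨hbest, monoO_refl best, by intro r1 r2 h1; omega⟩
  | succ u ih =>
    intro hu best hbest
    rw [List.range_succ, List.foldl_append, List.foldl_cons, List.foldl_nil]
    obtain ⟨i1, i2, i3⟩ := ih (by omega) best hbest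
    obtain ⟨j1, j2, j3, j4⟩ := innerBfold matrix k c1 c2 hc1 hc2 sums hsums u
      (matrix.length - u) (by omega) _ i1
    have hmu : u + (matrix.length - u) = matrix.length := by omega
    rw [hmu] at j4
    refine ⟨?_, ?_, ?_⟩
    · simpa [pvInnerB] using j2
    · exact monoO_trans i2 (by simpa [pvInnerB] using j3)
    · intro r1 r2 hr1 hr12 hr2 hSk
      rcases Nat.lt_or_ge r1 u with hlt | hge
      · exact geO_mono (i3 r1 r2 hlt hr12 hr2 hSk) (by simpa [pvInnerB] using j3)
      · have : r1 = u := by omega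
        subst this
        simpa [pvInnerB] using j4 r2 hr12 hr2 hSk

lemma c2foldB (matrix : List (List Int)) (k : Int) (c1 : Nat) :
    ∀ u : Nat, c1 + u ≤ (matrix.headD []).length →
    ∀ st : List Int × Option Int,
      (∀ r : Nat, r < matrix.length →
        st.1.getD r 0 = rowPreM matrix r c1 - rowPreM matrix r c1) →
      soundO matrix k st.2 →
    soundO matrix k ((List.range' c1 u).foldl (pvColStep matrix k matrix.length) st).2 ∧
    monoO st.2 ((List.range' c1 u).foldl (pvColStep matrix k matrix.length) st).2 ∧
    (∀ r : Nat, r < matrix.length →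
      ((List.range' c1 u).foldl (pvColStep matrix k matrix.length) st).1.getD r 0
        = rowPreM matrix r (c1+u) - rowPreM matrix r c1) ∧
    (∀ c2 : Nat, c1 ≤ c2 → c2 < c1 + u →
      compPairO matrix k c1 c2
        ((List.range' c1 u).foldl (pvColStep matrix k matrix.length) st).2) := by
  intro u
  induction u with
  | zero =>
    intro _ st hsums hbest
    simp only [List.range'_zero, List.foldl_nil]
    exact ⟨hbest, monoO_refl st.2, by simpa using hsums, by intro c2 h1 h2; omega⟩
  | succ u ih =>
    intro hu st hsums hbest
    rw [List.range'_1_concat, List.foldl_append, List.foldl_cons, List.foldl_nil]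
    obtain ⟨i1, i2, i3, i4⟩ := ih (by omega) st hsums hbest
    set st1 := (List.range' c1 u).foldl (pvColStep matrix k matrix.length) st with hst1
    -- the new running sums include column c1+u
    have hsums' : ∀ r : Nat, r < matrix.length →
        ((List.range matrix.length).map
          (fun r => st1.1.getD r 0 + (matrix.getD r []).getD (c1+u) 0)).getD r 0
          = rowPreM matrix r (c1+u+1) - rowPreM matrix r c1 := by
      intro r hr
      have hr' : r < (List.range matrix.length).length := by simpa using hr
      rw [List.getD_eq_getElem _ _ (by simpa using hr'), List.getElem_map, List.getElem_range]
      rw [i3 r hr, rowPre_succ]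
      unfold cellM
      ring
    obtain ⟨q1, q2, q3⟩ := r1fold matrix k c1 (c1+u) (by omega) (by omega) _ hsums'
      matrix.length (le_refl _) st1.2 i1
    refine ⟨?_, ?_, ?_, ?_⟩
    · simpa [pvColStep] using q1
    · exact monoO_trans i2 (by simpa [pvColStep] using q2)
    · intro r hr
      simpa [pvColStep] using hsums' r hr
    · intro c2 hc21 hc22
      rcases Nat.lt_or_ge c2 (c1+u) with hlt | hge
      · exact compPairO_mono (i4 c2 hc21 hlt) (by simpa [pvColStep] using q2)
      · have : c2 = c1 + u := by omega
        subst this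
        intro r1 r2 h1 h2 h3
        simpa [pvColStep] using q3 r1 r2 (by omega) h1 h2 h3

lemma c1foldB (matrix : List (List Int)) (k : Int) :
    ∀ u : Nat, u ≤ (matrix.headD []).length →
    ∀ best : Option Int, soundO matrix k best →
    soundO matrix k ((List.range u).foldl (fun best c1 =>
        ((List.range' c1 ((matrix.headD []).length - c1)).foldl
          (pvColStep matrix k matrix.length) (List.replicate matrix.length 0, best)).2) best) ∧
    (∀ c1 c2 : Nat, c1 < u → c1 ≤ c2 → c2 < (matrix.headD []).length →
      compPairO matrix k c1 c2 ((List.range u).foldl (fun best c1 =>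
        ((List.range' c1 ((matrix.headD []).length - c1)).foldl
          (pvColStep matrix k matrix.length) (List.replicate matrix.length 0, best)).2) best)) := by
  intro u
  induction u with
  | zero =>
    intro _ best hbest
    simp only [List.range_zero, List.foldl_nil]
    exact ⟨hbest, by intro c1 c2 h1; omega⟩
  | succ u ih =>
    intro hu best hbest
    rw [List.range_succ, List.foldl_append, List.foldl_cons, List.foldl_nil]
    obtain ⟨i1, i2⟩ := ih (by omega) best hbest
    have hrepl : ∀ r : Nat, r < matrix.length →
        (List.replicate matrix.length (0 : Int)).getD r 0
          = rowPreM matrix r u - rowPreM matrix r u := by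
      intro r hr
      rw [List.getD_eq_getElem _ _ (by simpa using hr), List.getElem_replicate]
      ring
    obtain ⟨q1, q2, _, q4⟩ := c2foldB matrix k u ((matrix.headD []).length - u)
      (by omega)
      (List.replicate matrix.length 0, (List.range u).foldl (fun best c1 =>
        ((List.range' c1 ((matrix.headD []).length - c1)).foldl
          (pvColStep matrix k matrix.length) (List.replicate matrix.length 0, best)).2) best)
      hrepl i1
    refine ⟨q1, ?_⟩
    intro c1 c2 hc1 hc12 hc2
    rcases Nat.lt_or_ge c1 u with hlt | hge
    · exact compPairO_mono (i2 c1 c2 hlt hc12 hc2) q2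
    · have : c1 = u := by omega
      subst this
      exact q4 c2 hc12 (by omega)

lemma bResult (matrix : List (List Int)) (k : Int) :
    soundO matrix k
      ((List.range ((matrix.headD []).length)).foldl (fun best c1 =>
        ((List.range' c1 ((matrix.headD []).length - c1)).foldl
          (pvColStep matrix k matrix.length) (List.replicate matrix.length 0, best)).2)
        (none : Option Int)) ∧
    (∀ c1 c2 : Nat, c1 ≤ c2 → c2 < (matrix.headD []).length →
      compPairO matrix k c1 c2
        ((List.range ((matrix.headD []).length)).foldl (fun best c1 =>
          ((List.range' c1 ((matrix.headD []).length - c1)).foldl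
            (pvColStep matrix k matrix.length) (List.replicate matrix.length 0, best)).2)
          (none : Option Int))) := by
  obtain ⟨h1, h2⟩ := c1foldB matrix k ((matrix.headD []).length) (le_refl _)
    (none : Option Int) (by intro v hv; cases hv)
  exact ⟨h1, fun c1 c2 hc12 hc2 => h2 c1 c2 (by omega) hc12 hc2⟩

-- Pre_'s third clause produces a goodM witness
lemma pre_good (matrix : List (List Int)) (k : Int) (h : Pre_maxSumSubmatrix matrix k) :
    ∃ s : Int, goodM matrix k s := by
  obtain ⟨hne, hw, hany⟩ := h
  rw [List.any_eq_true] at hany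
  obtain ⟨c1, hc1m, h2⟩ := hany
  rw [List.mem_range] at hc1m
  rw [List.any_eq_true] at h2
  obtain ⟨c2, hc2m, h3⟩ := h2
  rw [List.mem_range'_1] at hc2m
  rw [List.any_eq_true] at h3
  obtain ⟨r1, hr1m, h4⟩ := h3
  rw [List.mem_range] at hr1m
  rw [List.any_eq_true] at h4
  obtain ⟨r2, hr2m, h5⟩ := h4
  rw [List.mem_range'_1] at hr2m
  rw [decide_eq_true_iff] at h5
  exact ⟨rectSumM matrix c1 c2 r1 r2,
    c1, c2, r1, r2, hc2m.1, by omega, hr2m.1, by omega, rfl, h5⟩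

-- ===== VERDICT (by name: the statement is the Claim_ definition above) =====
theorem maxSumSubmatrix_spec : Claim_equal_maxSumSubmatrix := by
  intro matrix k _hdom hpre
  obtain ⟨s0, hgood0⟩ := pre_good matrix k hpre
  obtain ⟨hne, hw, _⟩ := hpre
  obtain ⟨hAs, hAc⟩ := aResult matrix k hw
  obtain ⟨hBs, hBc⟩ := bResult matrix k
  obtain ⟨c1, c2, r1, r2, g1, g2, g3, g4, g5, g6⟩ := hgood0
  obtain ⟨vA, hvA, _⟩ := hAc c1 c2 g1 g2 r1 r2 g3 g4 (by rw [← g5]; exact g6)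
  obtain ⟨vB, hvB, _⟩ := hBc c1 c2 g1 g2 r1 r2 g3 g4 (by rw [← g5]; exact g6)
  -- vA ≤ vB
  obtain ⟨d1, d2, d3, d4, e1, e2, e3, e4, e5, e6⟩ := hAs vA hvA
  obtain ⟨vB', hvB', hAB⟩ := hBc d1 d2 e1 e2 d3 d4 e3 e4 (by rw [← e5]; exact e6)
  rw [hvB] at hvB'
  injection hvB' with hvB''
  -- vB ≤ vA
  obtain ⟨f1, f2, f3, f4, g1', g2', g3', g4', g5', g6'⟩ := hBs vB hvB
  obtain ⟨vA', hvA', hBA⟩ := hAc f1 f2 g1' g2' f3 f4 g3' g4' (by rw [← g5']; exact g6')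
  rw [hvA] at hvA'
  injection hvA' with hvA''
  have hvv : vA = vB := by
    rw [← e5] at hAB
    rw [← g5'] at hBA
    omega
  unfold Spec_maxSumSubmatrix
  have hAeq : maxSumSubmatrix matrix k = vA := by
    simp only [maxSumSubmatrix]
    rw [headD_map_prefix matrix hne, hvA]
    rfl
  have hBeq : maxSumSubmatrix_alt matrix k = vB := by
    simp only [maxSumSubmatrix_alt]
    rw [hvB]
    rfl
  rw [hAeq, hBeq, hvv]
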